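-- pv_equiv track=rewrite | github.com/Chocolate-Monster/Ticker-Symbols-Disambiguation-2019 | research/utils.py | get_top_words_exclusive
-- ===== SOURCE A (Python) =====
-- from collections import Counter
-- from itertools import islice
--
-- def get_top_words_exclusive(words_a, words_b, count=10, exclude_count=100):
--     def fst(x):
--         return x[0]
--
--     words_a_cnt = Counter(words_a)
--     words_b_cnt = Counter(words_b)
--
--     return list(islice(
--         (x for x, _ in words_a_cnt.most_common()
--         if x not in set(map(fst, words_b_cnt.most_common(exclude_count)))),
--         count
--     ))
-- ===== SOURCE B (Python) =====
-- from collections import Counter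
--
--
-- def get_top_words_exclusive(words_a, words_b, count=10, exclude_count=100):
--     excluded = {w for w, _ in Counter(words_b).most_common(exclude_count)}
--     buckets = {}
--     for w, c in Counter(words_a).items():
--         if w not in excluded:
--             buckets.setdefault(c, []).append(w)
--     out = []
--     for c in sorted(buckets, reverse=True):
--         out.extend(buckets[c])
--     return out[:count]
-- ===== Notes on version B (the rewrite author's own statement) =====
-- stated objective: faster
-- what changed: B builds the exclusion set once (A rebuilds it inside the generator for every produced word), buckets the surviving counter items by frequency in a dict, and emits the buckets in descending-frequency order (sorting only the distinct counts) instead of A's full stable sort of all items via most_common() + filter + islice.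
import Mathlib
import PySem

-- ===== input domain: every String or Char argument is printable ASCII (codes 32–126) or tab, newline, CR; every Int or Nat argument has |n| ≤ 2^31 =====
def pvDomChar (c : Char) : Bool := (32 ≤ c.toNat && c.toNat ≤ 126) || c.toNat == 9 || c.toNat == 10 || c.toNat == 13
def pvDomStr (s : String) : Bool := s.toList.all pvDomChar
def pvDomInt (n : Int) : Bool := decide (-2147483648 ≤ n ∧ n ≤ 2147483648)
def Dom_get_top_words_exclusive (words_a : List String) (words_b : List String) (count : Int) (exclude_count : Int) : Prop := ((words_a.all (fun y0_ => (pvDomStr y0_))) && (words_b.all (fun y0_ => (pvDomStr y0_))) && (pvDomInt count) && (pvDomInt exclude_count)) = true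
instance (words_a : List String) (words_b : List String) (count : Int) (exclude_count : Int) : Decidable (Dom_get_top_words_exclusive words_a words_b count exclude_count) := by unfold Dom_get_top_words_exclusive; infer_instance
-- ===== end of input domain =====

-- B builds the exclusion set once, buckets the surviving counter items by frequency in a dict,
-- and emits the buckets in descending-frequency order (sorting only the distinct counts),
-- instead of A's full stable sort of all items (most_common()) + filter + islice.

-- ===== PORT A =====
-- A rebuilds `set(map(fst, words_b_cnt.most_common(exclude_count)))` inside the generator for
-- every produced element; the expression is pure, so the port computes it once.
-- most_common() is sorted(items, key=itemgetter(1), reverse=True); most_common(n) takes the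
-- first n of that (empty for n < 0, which `.toNat` gives exactly).
def get_top_words_exclusive (words_a : List String) (words_b : List String) (count : Int) (exclude_count : Int) : List String :=
  let words_a_cnt := PySem.Dict.counter words_a
  let words_b_cnt := PySem.Dict.counter words_b
  let excl : PySem.Set String :=
    PySem.Set.ofList (((PySem.List.sorted words_b_cnt.items (fun p => p.2) true).take exclude_count.toNat).map (fun p => p.1))
  (((PySem.List.sorted words_a_cnt.items (fun p => p.2) true).filter (fun p => !(excl.contains p.1))).map (fun p => p.1)).take count.toNat

-- ===== PORT B =====
-- buckets.setdefault(c, []).append(w) is Dict.modify c [] (· ++ [w]); sorted(buckets, reverse=True)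
-- iterates the dict's keys; out[:count] is PySem.List.slice (Python-exact, also for count < 0).
def get_top_words_exclusive_alt (words_a : List String) (words_b : List String) (count : Int) (exclude_count : Int) : List String :=
  let excluded : PySem.Set String :=
    PySem.Set.ofList (((PySem.List.sorted (PySem.Dict.counter words_b).items (fun p => p.2) true).take exclude_count.toNat).map (fun p => p.1))
  let buckets : PySem.Dict Int (List String) :=
    (PySem.Dict.counter words_a).items.foldl
      (fun d p => if !(excluded.contains p.1) then d.modify p.2 [] (fun ws => ws ++ [p.1]) else d)
      PySem.Dict.empty
  let out : List String :=
    (PySem.List.sorted buckets.keys (fun c => c) true).foldl (fun acc c => acc ++ buckets.getD c []) []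
  PySem.List.slice out none (some count)

-- ===== PRECONDITION & SPEC =====
-- Pre_ excludes only count < 0, where A raises ValueError (islice rejects a negative stop).
def Pre_get_top_words_exclusive (words_a : List String) (words_b : List String) (count : Int) (exclude_count : Int) : Prop := 0 ≤ count
instance (words_a : List String) (words_b : List String) (count : Int) (exclude_count : Int) : Decidable (Pre_get_top_words_exclusive words_a words_b count exclude_count) := by unfold Pre_get_top_words_exclusive; infer_instance
def pvWitness_get_top_words_exclusive : List String × List String × Int × Int := (["a", "b", "a"], ["b"], 2, 1)

def Spec_get_top_words_exclusive (words_a : List String) (words_b : List String) (count : Int) (exclude_count : Int) (out : List String) : Prop := out = get_top_words_exclusive_alt words_a words_b count exclude_count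
instance (words_a : List String) (words_b : List String) (count : Int) (exclude_count : Int) (out : List String) : Decidable (Spec_get_top_words_exclusive words_a words_b count exclude_count out) := by unfold Spec_get_top_words_exclusive; infer_instance

-- ===== CLAIM (what is proved, stated in full; the proofs are below) =====
def Claim_equal_get_top_words_exclusive : Prop := ∀ (words_a : List String) (words_b : List String) (count : Int) (exclude_count : Int), Dom_get_top_words_exclusive words_a words_b count exclude_count → Pre_get_top_words_exclusive words_a words_b count exclude_count → Spec_get_top_words_exclusive words_a words_b count exclude_count (get_top_words_exclusive words_a words_b count exclude_count)

-- ===== LEMMAS AND PROOFS =====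

-- Inserting an element that strictly beats every element of the list goes to the head.
theorem insertBy_of_forall_lt {α κ : Type} [LinearOrder κ] (key : α → κ) (x : α) (zs : List α)
    (h : ∀ b ∈ zs, key b < key x) :
    PySem.List.insertBy (fun a b => decide (key b < key a)) x zs = x :: zs := by
  cases zs with
  | nil => rfl
  | cons b t =>
    simp [PySem.List.insertBy, h b (List.mem_cons_self)]

-- Insertion (reverse order, stable) preserves descending sortedness.
theorem insertBy_pairwise_rev {α κ : Type} [LinearOrder κ] (key : α → κ) (x : α) (ys : List α)
    (h : ys.Pairwise (fun a b => key b ≤ key a)) :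
    (PySem.List.insertBy (fun a b => decide (key b < key a)) x ys).Pairwise (fun a b => key b ≤ key a) := by
  induction ys with
  | nil => simp [PySem.List.insertBy]
  | cons y ys ih =>
    rcases List.pairwise_cons.mp h with ⟨hy, hys⟩
    by_cases hlt : key y < key x
    · simp only [PySem.List.insertBy, hlt, decide_true, if_true]
      refine List.pairwise_cons.mpr ⟨?_, h⟩
      intro b hb
      rcases List.mem_cons.mp hb with rfl | hb
      · exact le_of_lt hlt
      · exact le_trans (hy b hb) (le_of_lt hlt)
    · simp only [PySem.List.insertBy, hlt, decide_false]
      refine List.pairwise_cons.mpr ⟨?_, ih hys⟩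
      intro b hb
      rcases (PySem.List.mem_insertBy _ _ _ _).mp hb with rfl | hb
      · exact not_lt.mp hlt
      · exact hy b hb

-- On a descending-sorted list, stable insertion commutes with filter.
theorem filter_insertBy_rev {α κ : Type} [LinearOrder κ] (key : α → κ) (q : α → Bool) (x : α)
    (ys : List α) (h : ys.Pairwise (fun a b => key b ≤ key a)) :
    (PySem.List.insertBy (fun a b => decide (key b < key a)) x ys).filter q =
      if q x then PySem.List.insertBy (fun a b => decide (key b < key a)) x (ys.filter q)
      else ys.filter q := by
  induction ys with
  | nil => simp [PySem.List.insertBy, List.filter]; split <;> simp_all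
  | cons y ys ih =>
    rcases List.pairwise_cons.mp h with ⟨hy, hys⟩
    by_cases hlt : key y < key x
    · simp only [PySem.List.insertBy, hlt, decide_true, if_true]
      by_cases hqy : q y
      · by_cases hqx : q x <;>
          simp [List.filter, hqx, hqy, PySem.List.insertBy, hlt]
      · by_cases hqx : q x
        · have hall : ∀ b ∈ ys.filter q, key b < key x := by
            intro b hb
            exact lt_of_le_of_lt (hy b (List.mem_of_mem_filter hb)) hlt
          simp [List.filter, hqx, hqy, insertBy_of_forall_lt key x _ hall]
        · simp [List.filter, hqx, hqy]
    · simp only [PySem.List.insertBy, hlt, decide_false]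
      by_cases hqy : q y
      · by_cases hqx : q x <;>
          simp [List.filter, hqx, hqy, ih hys, PySem.List.insertBy, hlt]
      · by_cases hqx : q x <;> simp [List.filter, hqx, hqy, ih hys]

-- The foldl form: filtering the accumulator commutes with the whole insertion-sort loop.
theorem filter_foldl_insertBy {α κ : Type} [LinearOrder κ] (key : α → κ) (q : α → Bool)
    (xs : List α) :
    ∀ acc : List α, acc.Pairwise (fun a b => key b ≤ key a) →
      (xs.foldl (fun acc x => PySem.List.insertBy (fun a b => decide (key b < key a)) x acc) acc).filter q =
        (xs.filter q).foldl (fun acc x => PySem.List.insertBy (fun a b => decide (key b < key a)) x acc) (acc.filter q) := by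
  induction xs with
  | nil => intro acc _; rfl
  | cons x xs ih =>
    intro acc hacc
    have hstep := ih (PySem.List.insertBy (fun a b => decide (key b < key a)) x acc)
      (insertBy_pairwise_rev key x acc hacc)
    by_cases hqx : q x <;>
      simp [List.foldl_cons, List.filter, hqx, hstep,
        filter_insertBy_rev key q x acc hacc]

-- STABILITY: a stable descending sort commutes with filter.
theorem filter_sorted_rev {α κ : Type} [LinearOrder κ] (key : α → κ) (q : α → Bool) (xs : List α) :
    (PySem.List.sorted xs key true).filter q = PySem.List.sorted (xs.filter q) key true := by
  rw [PySem.List.sorted_rev_eq_foldl_insertBy, PySem.List.sorted_rev_eq_foldl_insertBy]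
  simpa using filter_foldl_insertBy key q xs [] (by simp)

-- A guarded fold is the fold over the filtered list.
theorem foldl_guard_filter {α β : Type} (q : α → Bool) (f : β → α → β) (l : List α) :
    ∀ a : β, l.foldl (fun d x => if q x then f d x else d) a = (l.filter q).foldl f a := by
  induction l with
  | nil => intro a; rfl
  | cons x l ih =>
    intro a
    by_cases hx : q x <;> simp [List.filter, hx, ih]

-- Concatenating a descending-sorted list's key-filters over a strictly descending key list
-- that covers all its keys reproduces the list.
theorem flatMap_filter_desc {α : Type} (key : α → Int) :
    ∀ (ks : List Int), ks.Pairwise (fun a b => b < a) →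
      ∀ l : List α, l.Pairwise (fun a b => key b ≤ key a) → (∀ x ∈ l, key x ∈ ks) →
        ks.flatMap (fun c => l.filter (fun x => key x == c)) = l := by
  intro ks
  induction ks with
  | nil =>
    intro _ l _ hmem
    have hl : l = [] := by
      cases l with
      | nil => rfl
      | cons a t => exact absurd (hmem a List.mem_cons_self) (List.not_mem_nil)
    simp [hl]
  | cons k ks ih =>
    intro hks l
    rcases List.pairwise_cons.mp hks with ⟨hgt, hks'⟩
    induction l with
    | nil => intro _ _; simp
    | cons a l' ihl =>
      intro hpl hmem
      rcases List.pairwise_cons.mp hpl with ⟨hle, hpl'⟩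
      by_cases hak : key a = k
      · -- the head a lands in the k-bucket; the other buckets ignore it
        have hcong : ks.flatMap (fun c => (a :: l').filter (fun x => key x == c)) =
            ks.flatMap (fun c => l'.filter (fun x => key x == c)) := by
          apply List.flatMap_congr
          intro c hc
          have hne : ¬ (key a == c) = true := by
            have := hgt c hc
            simp only [beq_iff_eq]
            omega
          simp [hne]
        have htail : (k :: ks).flatMap (fun c => l'.filter (fun x => key x == c)) = l' :=
          ihl hpl' (fun x hx => hmem x (List.mem_cons_of_mem a hx))
        calc (k :: ks).flatMap (fun c => (a :: l').filter (fun x => key x == c))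
            = (a :: l').filter (fun x => key x == k) ++
                ks.flatMap (fun c => (a :: l').filter (fun x => key x == c)) := by
              rw [List.flatMap_cons]
          _ = a :: (l'.filter (fun x => key x == k) ++
                ks.flatMap (fun c => l'.filter (fun x => key x == c))) := by
              rw [hcong]; simp [hak]
          _ = a :: (k :: ks).flatMap (fun c => l'.filter (fun x => key x == c)) := by
              rw [List.flatMap_cons]
          _ = a :: l' := by rw [htail]
      · -- every key of a :: l' is below k: the k-bucket is empty, recurse on ks
        have hmema : key a ∈ ks := by
          rcases List.mem_cons.mp (hmem a List.mem_cons_self) with h | h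
          · exact absurd h hak
          · exact h
        have hka : key a < k := hgt _ hmema
        have hallle : ∀ x ∈ a :: l', key x ≤ key a := by
          intro x hx
          rcases List.mem_cons.mp hx with rfl | hx
          · exact le_refl _
          · exact hle x hx
        have hfk : (a :: l').filter (fun x => key x == k) = [] := by
          apply List.filter_eq_nil_iff.mpr
          intro x hx
          have := hallle x hx
          simp only [beq_iff_eq]
          omega
        rw [List.flatMap_cons, hfk, List.nil_append]
        apply ih hks' (a :: l') hpl
        intro x hx
        rcases List.mem_cons.mp (hmem x hx) with h | h
        · exact absurd h (by have := hallle x hx; omega)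
        · exact h

-- ===== VERDICT (by name: the statement is the Claim_ definition above) =====
theorem get_top_words_exclusive_spec : Claim_equal_get_top_words_exclusive := by
  intro words_a words_b count exclude_count _ hpre
  have hc : 0 ≤ count := hpre
  unfold Spec_get_top_words_exclusive get_top_words_exclusive get_top_words_exclusive_alt
  simp only []
  have hslice : ∀ l : List String, PySem.List.slice l none (some count) = l.take count.toNat := by
    intro l
    rw [show count = ((count.toNat : Nat) : Int) from (Int.toNat_of_nonneg hc).symm,
      PySem.List.slice_to_natCast, Int.toNat_natCast]
  rw [hslice]
  set excl : PySem.Set String :=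
    PySem.Set.ofList (((PySem.List.sorted (PySem.Dict.counter words_b).items (fun p => p.2) true).take exclude_count.toNat).map (fun p => p.1)) with hexcl
  set items := (PySem.Dict.counter words_a).items with hitems
  set q : String × Int → Bool := fun p => !(excl.contains p.1) with hq
  -- A side: push the filter through the stable sort
  rw [filter_sorted_rev]
  set fitems := items.filter q with hfit
  set s := PySem.List.sorted fitems (fun p => p.2) true with hs
  -- B side: the guarded bucket loop is the loop over the filtered items
  have hbuck0 : items.foldl
      (fun d p => if !(excl.contains p.1) then d.modify p.2 [] (fun ws => ws ++ [p.1]) else d)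
      PySem.Dict.empty =
      fitems.foldl (fun d p => d.modify p.2 [] (fun ws => ws ++ [p.1])) PySem.Dict.empty := by
    rw [hfit, ← foldl_guard_filter]
  set buckets := fitems.foldl (fun d p => d.modify p.2 [] (fun ws => ws ++ [p.1])) PySem.Dict.empty with hbuckets
  rw [hbuck0]
  -- each bucket holds the words of one count, in counter order
  have hgetD : ∀ c : Int, buckets.getD c [] = (fitems.filter (fun p => p.2 == c)).map (fun p => p.1) := by
    intro c
    have hswap : fitems.foldl (fun d p => d.modify p.2 [] (fun ws => ws ++ [p.1])) (PySem.Dict.empty : PySem.Dict Int (List String))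
        = (fitems.map (fun p : String × Int => (p.2, p.1))).foldl
            (fun d r => d.modify r.1 [] (fun ws => ws ++ [r.2])) PySem.Dict.empty := by
      rw [List.foldl_map]
    rw [hbuckets, hswap, PySem.Dict.getD_foldl_modify_append]
    simp [List.filter_map, List.map_map, Function.comp_def]
  -- the dict's keys are exactly the counts of the surviving items, without duplicates
  have hkeys : buckets.keys = PySem.Set.update ([] : List Int) (fitems.map (fun p => p.2)) := by
    rw [hbuckets, PySem.Dict.keys_foldl_modify_key]
    simp
  have hkeysnd : buckets.keys.Nodup := by
    rw [hbuckets]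
    exact PySem.Dict.nodup_keys_foldl_modify_key fitems (fun p => p.2) [] _ PySem.Dict.empty (by simp)
  set ks := PySem.List.sorted buckets.keys (fun c => c) true with hks
  have hks_pw : ks.Pairwise (fun a b => b < a) := by
    have h1 : ks.Pairwise (fun a b : Int => b ≤ a) := PySem.List.sorted_pairwise_rev buckets.keys (fun c => c)
    have h2 : ks.Nodup := ((PySem.List.sorted_perm buckets.keys (fun c => c) true).symm.nodup_iff).mp hkeysnd
    exact (h1.and h2).imp (fun h => lt_of_le_of_ne h.1 h.2.symm)
  have hcover : ∀ x ∈ s, (fun p : String × Int => p.2) x ∈ ks := by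
    intro x hxs
    have hxf : x ∈ fitems := (PySem.List.mem_sorted fitems (fun p => p.2) true x).mp hxs
    rw [hks]
    apply (PySem.List.mem_sorted buckets.keys (fun c => c) true _).mpr
    rw [hkeys]
    exact (PySem.Set.mem_update _ _ _).mpr (Or.inr (List.mem_map_of_mem hxf))
  -- the emission loop is the concatenation of the buckets in descending count order
  rw [PySem.List.foldl_append_eq_flatMap, List.nil_append]
  simp only [hgetD]
  rw [← List.map_flatMap]
  have hfix : ∀ c : Int, fitems.filter (fun p => p.2 == c) = s.filter (fun p => p.2 == c) := by
    intro c
    rw [hs, filter_sorted_rev]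
    refine (PySem.List.sorted_rev_eq_self_of_pairwise (fitems.filter (fun p => p.2 == c)) (fun p : String × Int => p.2) ?_).symm
    apply List.pairwise_iff_forall_sublist.mpr
    intro a b hab
    have ha := (List.mem_filter.mp (hab.subset List.mem_cons_self)).2
    have hb := (List.mem_filter.mp (hab.subset (List.mem_cons_of_mem a List.mem_cons_self))).2
    simp only [beq_iff_eq] at ha hb
    show b.2 ≤ a.2
    omega
  simp only [hfix]
  rw [flatMap_filter_desc (fun p : String × Int => p.2) ks hks_pw s
    (PySem.List.sorted_pairwise_rev fitems (fun p => p.2)) hcover]
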